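-- pv_equiv track=rewrite | github.com/prash-kr-meena/GoogleR | Interview/Zeta/Code2.py | helper
-- ===== SOURCE A (Python) =====
-- def helper(array_sum, n, x, arr, index, subset_sum) -> bool:
--     if index >= n:
--         if array_sum - subset_sum <= x:
--             return True
--
--         return False
--
--     answer_when_choosing = False
--     if arr[index] + subset_sum <= x:  # can  choose
--         answer_when_choosing = helper(array_sum, n, x, arr, index + 1, subset_sum + arr[index])
--
--     # not choosing
--     answer_when_not_choosing = helper(array_sum, n, x, arr, index + 1, subset_sum)
--
--     return answer_when_choosing or answer_when_not_choosing
-- ===== SOURCE B (Python) =====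
-- def helper(array_sum, n, x, arr, index, subset_sum) -> bool:
--     # Iterative breadth-first DP: grow the set of reachable subset sums
--     # (respecting the same "only choose if the new sum stays <= x" rule),
--     # then test every final sum at once.
--     reachable = [subset_sum]
--     for i in range(index, n):
--         a = arr[i]
--         reachable += [s + a for s in reachable if s + a <= x]
--     return any(array_sum - s <= x for s in reachable)
-- ===== Notes on version B (the rewrite author's own statement) =====
-- stated objective: alternative
-- what changed: Replaces the branching choose/not-choose recursion by an iterative breadth-first accumulation of all reachable subset sums (one list grown per element, one final any-scan), instead of depth-first recursion with an or of two recursive calls.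
import Mathlib
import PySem

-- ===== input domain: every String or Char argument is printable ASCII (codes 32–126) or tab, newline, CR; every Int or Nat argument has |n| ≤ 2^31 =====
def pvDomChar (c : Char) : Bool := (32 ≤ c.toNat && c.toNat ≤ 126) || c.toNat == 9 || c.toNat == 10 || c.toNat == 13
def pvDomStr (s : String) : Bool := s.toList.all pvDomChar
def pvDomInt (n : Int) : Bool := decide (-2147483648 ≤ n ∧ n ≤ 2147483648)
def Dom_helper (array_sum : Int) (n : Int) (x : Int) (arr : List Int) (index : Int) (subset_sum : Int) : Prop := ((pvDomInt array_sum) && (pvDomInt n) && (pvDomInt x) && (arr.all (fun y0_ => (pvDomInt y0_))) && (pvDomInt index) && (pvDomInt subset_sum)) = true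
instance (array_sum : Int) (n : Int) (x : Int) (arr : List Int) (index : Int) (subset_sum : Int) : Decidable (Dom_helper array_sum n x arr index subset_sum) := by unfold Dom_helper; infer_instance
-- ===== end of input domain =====

-- B replaces A's choose/not-choose depth-first recursion by an iterative
-- breadth-first accumulation of all reachable subset sums; same cost class
-- (objective: alternative algorithm), return value proved identical on Pre_.

-- ===== PORT A =====
-- literal transliteration of A's recursion; arr[index] is pyGet? (none = IndexError, excluded by Pre_)
def helper (array_sum : Int) (n : Int) (x : Int) (arr : List Int) (index : Int) (subset_sum : Int) : Bool :=
  if index ≥ n then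
    decide (array_sum - subset_sum ≤ x)
  else
    match PySem.List.pyGet? arr index with
    | none => false   -- Python raises IndexError here; outside Pre_helper
    | some a =>
      let answer_when_choosing :=
        if a + subset_sum ≤ x then
          helper array_sum n x arr (index + 1) (subset_sum + a)
        else false
      let answer_when_not_choosing := helper array_sum n x arr (index + 1) subset_sum
      answer_when_choosing || answer_when_not_choosing
termination_by (n - index).toNat
decreasing_by all_goals omega

-- ===== PORT B =====
-- the for-loop of Source B: one pass over range(index, n), growing the reachable list
def helperAltLoop (x : Int) (arr : List Int) (idxs : List Int) (reachable : List Int) : List Int :=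
  match idxs with
  | [] => reachable
  | i :: rest =>
    match PySem.List.pyGet? arr i with
    | none => helperAltLoop x arr rest reachable   -- Python raises IndexError here; outside Pre_helper
    | some a =>
      helperAltLoop x arr rest
        (reachable ++ reachable.filterMap (fun s => if s + a ≤ x then some (s + a) else none))

def helper_alt (array_sum : Int) (n : Int) (x : Int) (arr : List Int) (index : Int) (subset_sum : Int) : Bool :=
  (helperAltLoop x arr (PySem.List.pyRange index n 1) [subset_sum]).any
    (fun s => decide (array_sum - s ≤ x))

-- ===== PRECONDITION & SPEC =====
-- Pre_ excludes exactly the inputs where A raises IndexError: whenever index < n,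
-- every position in range(index, n) must be a valid Python index of arr.
def Pre_helper (array_sum : Int) (n : Int) (x : Int) (arr : List Int) (index : Int) (subset_sum : Int) : Prop :=
  n ≤ index ∨ (-(arr.length : Int) ≤ index ∧ n ≤ (arr.length : Int))
instance (array_sum : Int) (n : Int) (x : Int) (arr : List Int) (index : Int) (subset_sum : Int) : Decidable (Pre_helper array_sum n x arr index subset_sum) := by unfold Pre_helper; infer_instance

def pvWitness_helper : Int × Int × Int × List Int × Int × Int := (7, 3, 4, [3, 1, 3], 0, 0)

def Spec_helper (array_sum : Int) (n : Int) (x : Int) (arr : List Int) (index : Int) (subset_sum : Int) (out : Bool) : Prop := out = helper_alt array_sum n x arr index subset_sum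
instance (array_sum : Int) (n : Int) (x : Int) (arr : List Int) (index : Int) (subset_sum : Int) (out : Bool) : Decidable (Spec_helper array_sum n x arr index subset_sum out) := by unfold Spec_helper; infer_instance

-- ===== CLAIM (what is proved, stated in full; the proofs are below) =====
def Claim_equal_helper : Prop := ∀ (array_sum : Int) (n : Int) (x : Int) (arr : List Int) (index : Int) (subset_sum : Int), Dom_helper array_sum n x arr index subset_sum → Pre_helper array_sum n x arr index subset_sum → Spec_helper array_sum n x arr index subset_sum (helper array_sum n x arr index subset_sum)

-- ===== LEMMAS AND PROOFS =====

-- the loop result's membership only depends on the membership of the seed list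
theorem mem_helperAltLoop_congr (x : Int) (arr : List Int) (idxs : List Int)
    (S S' : List Int) (h : ∀ z, z ∈ S ↔ z ∈ S') (y : Int) :
    y ∈ helperAltLoop x arr idxs S ↔ y ∈ helperAltLoop x arr idxs S' := by
  induction idxs generalizing S S' with
  | nil => simpa [helperAltLoop] using h y
  | cons i rest ih =>
    simp only [helperAltLoop]
    cases PySem.List.pyGet? arr i with
    | none => exact ih S S' h
    | some a =>
      apply ih
      intro z
      simp only [List.mem_append, List.mem_filterMap]
      constructor
      · rintro (hz | ⟨s, hs, hz⟩)
        · exact Or.inl ((h z).mp hz)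
        · exact Or.inr ⟨s, (h s).mp hs, hz⟩
      · rintro (hz | ⟨s, hs, hz⟩)
        · exact Or.inl ((h z).mpr hz)
        · exact Or.inr ⟨s, (h s).mpr hs, hz⟩

theorem mem_helperAltLoop_append (x : Int) (arr : List Int) (idxs : List Int)
    (S1 S2 : List Int) (y : Int) :
    y ∈ helperAltLoop x arr idxs (S1 ++ S2) ↔
      y ∈ helperAltLoop x arr idxs S1 ∨ y ∈ helperAltLoop x arr idxs S2 := by
  induction idxs generalizing S1 S2 with
  | nil => simp [helperAltLoop]
  | cons i rest ih =>
    simp only [helperAltLoop]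
    cases PySem.List.pyGet? arr i with
    | none => exact ih S1 S2
    | some a =>
      rw [mem_helperAltLoop_congr x arr rest _
            ((S1 ++ S1.filterMap (fun s => if s + a ≤ x then some (s + a) else none)) ++
             (S2 ++ S2.filterMap (fun s => if s + a ≤ x then some (s + a) else none)))
            (by intro z; simp only [List.mem_append, List.mem_filterMap]; aesop)]
      exact ih _ _

theorem helperAltLoop_nil (x : Int) (arr : List Int) (idxs : List Int) :
    helperAltLoop x arr idxs [] = [] := by
  induction idxs with
  | nil => rfl
  | cons i rest ih =>
    simp only [helperAltLoop]
    cases PySem.List.pyGet? arr i with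
    | none => exact ih
    | some a => simpa using ih

theorem any_of_mem_iff (p : Int → Bool) (l1 l2 l3 : List Int)
    (h : ∀ z, z ∈ l1 ↔ z ∈ l2 ∨ z ∈ l3) : l1.any p = (l2.any p || l3.any p) := by
  rw [Bool.eq_iff_iff]
  simp only [List.any_eq_true, Bool.or_eq_true]
  constructor
  · rintro ⟨y, hy, hp⟩
    rcases (h y).mp hy with h' | h'
    · exact Or.inl ⟨y, h', hp⟩
    · exact Or.inr ⟨y, h', hp⟩
  · rintro (⟨y, hy, hp⟩ | ⟨y, hy, hp⟩)
    · exact ⟨y, (h y).mpr (Or.inl hy), hp⟩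
    · exact ⟨y, (h y).mpr (Or.inr hy), hp⟩

-- main invariant: A's recursion from (i, s) equals B's loop over range(i, n) seeded with [s]
theorem helper_eq_loop (array_sum n x : Int) (arr : List Int)
    (hn : n ≤ (arr.length : Int)) :
    ∀ (k : Nat) (i s : Int), (n - i).toNat ≤ k → -(arr.length : Int) ≤ i →
      helper array_sum n x arr i s =
        (helperAltLoop x arr (PySem.List.pyRange i n 1) [s]).any
          (fun t => decide (array_sum - t ≤ x)) := by
  intro k
  induction k with
  | zero =>
    intro i s hk hi
    have hin : n ≤ i := by omega
    rw [helper, if_pos hin, PySem.List.pyRange_one_eq_nil hin]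
    simp [helperAltLoop]
  | succ k ih =>
    intro i s hk hi
    by_cases hin : n ≤ i
    · rw [helper, if_pos hin, PySem.List.pyRange_one_eq_nil hin]
      simp [helperAltLoop]
    · have hlt : i < n := by omega
      obtain ⟨a, ha⟩ : ∃ a, PySem.List.pyGet? arr i = some a := by
        cases hcase : PySem.List.pyGet? arr i with
        | some a => exact ⟨a, rfl⟩
        | none =>
          exfalso
          rw [PySem.List.pyGet?_eq_none_iff] at hcase
          exact hcase ⟨hi, by omega⟩
      rw [helper, if_neg (by omega), ha]
      rw [PySem.List.pyRange_one_cons hlt]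
      simp only [helperAltLoop, ha]
      have hrec1 := ih (i + 1) s (by omega) (by omega)
      have hsplit := any_of_mem_iff (fun t => decide (array_sum - t ≤ x))
        (helperAltLoop x arr (PySem.List.pyRange (i + 1) n 1)
          ([s] ++ [s].filterMap (fun t => if t + a ≤ x then some (t + a) else none)))
        (helperAltLoop x arr (PySem.List.pyRange (i + 1) n 1) [s])
        (helperAltLoop x arr (PySem.List.pyRange (i + 1) n 1)
          ([s].filterMap (fun t => if t + a ≤ x then some (t + a) else none)))
        (fun z => mem_helperAltLoop_append x arr _ _ _ z)
      simp only [List.singleton_append] at hsplit ⊢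
      rw [hsplit, ← hrec1]
      by_cases hch' : s + a ≤ x
      · have hch : a + s ≤ x := by omega
        rw [if_pos hch]
        have hrec2 := ih (i + 1) (s + a) (by omega) (by omega)
        have hfm : [s].filterMap (fun t => if t + a ≤ x then some (t + a) else none) = [s + a] := by
          simp [hch']
        rw [hfm, ← hrec2, Bool.or_comm]
      · have hch : ¬ a + s ≤ x := by omega
        rw [if_neg hch]
        have hfm : [s].filterMap (fun t => if t + a ≤ x then some (t + a) else none) = [] := by
          simp [hch']
        rw [hfm, helperAltLoop_nil]
        simp

-- ===== VERDICT (by name: the statement is the Claim_ definition above) =====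
theorem helper_spec : Claim_equal_helper := by
  intro array_sum n x arr index subset_sum _ hpre
  unfold Spec_helper helper_alt
  rcases hpre with hpre | ⟨h1, h2⟩
  · rw [helper, if_pos hpre, PySem.List.pyRange_one_eq_nil hpre]
    simp [helperAltLoop]
  · exact helper_eq_loop array_sum n x arr h2 (n - index).toNat index subset_sum le_rfl h1
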